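-- pv_equiv track=rewrite | github.com/nxp-imx/gtec-demo-framework | .Config/FslBuildGen/Util.py | ChangeToBashEnvVariables
-- ===== SOURCE A (Python) =====
-- def ChangeToBashEnvVariables(path: str) -> str:
--     index = path.find("$(")
--     if index < 0:
--         return path
--     endIndex = path.find(")")
--     if endIndex < 0:
--         return path
--     start = path[:index]
--     envName = path[index+2:endIndex]
--     end = path[endIndex+1:]
--     path = "%s$%s%s" % (start, envName, end)
--     return ChangeToBashEnvVariables(path)
-- ===== SOURCE B (Python) =====
-- def ChangeToBashEnvVariables(path: str) -> str:
--     # Emit the already-converted prefix once and keep rewriting only the remainder: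
--     # everything before the first "$(" (which is also before the first ")") never changes again.
--     out = []
--     rest = path
--     while True:
--         index = rest.find("$(")
--         endIndex = rest.find(")")
--         if index < 0 or endIndex < index:
--             break
--         out.append(rest[:index])
--         rest = "$" + rest[index + 2:endIndex] + rest[endIndex + 1:]
--     out.append(rest)
--     return "".join(out)
-- ===== Notes on version B (the rewrite author's own statement) =====
-- stated objective: alternative
-- what changed: B replaces A's whole-string rebuild-and-recurse (which rescans the already-converted prefix on every round) with a loop that emits the finished prefix into an accumulator once and keeps rewriting only the shrinking remainder, joining the pieces at the end.
import Mathlib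
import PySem

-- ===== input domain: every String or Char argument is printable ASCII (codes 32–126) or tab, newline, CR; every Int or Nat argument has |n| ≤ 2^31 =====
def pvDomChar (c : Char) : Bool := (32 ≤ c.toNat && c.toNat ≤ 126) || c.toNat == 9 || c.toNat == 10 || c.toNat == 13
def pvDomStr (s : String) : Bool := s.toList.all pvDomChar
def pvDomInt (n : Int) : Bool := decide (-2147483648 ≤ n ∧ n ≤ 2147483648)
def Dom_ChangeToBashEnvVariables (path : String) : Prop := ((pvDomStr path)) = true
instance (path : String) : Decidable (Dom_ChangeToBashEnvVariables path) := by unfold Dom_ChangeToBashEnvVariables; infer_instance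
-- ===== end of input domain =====

-- B emits the already-converted prefix into an accumulator once and keeps rewriting only the
-- shrinking remainder, instead of A's rebuild-whole-string-and-recurse (objective: alternative).


-- ===== PORT A =====
-- fuel is a totality guard only: under Pre_ every rewrite shortens the string by one character,
-- so `path.len + 1` rounds are never exhausted (proved below).
def pvAgo : Nat → String → String
  | 0, path => path
  | fuel + 1, path =>
    let index := PySem.Str.find path "$("
    if index < 0 then path
    else
      let endIndex := PySem.Str.find path ")"
      if endIndex < 0 then path
      else
        let start := PySem.Str.slice path none (some index)
        let envName := PySem.Str.slice path (some (index + 2)) (some endIndex)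
        let endStr := PySem.Str.slice path (some (endIndex + 1)) none
        pvAgo fuel (start ++ "$" ++ envName ++ endStr)

def ChangeToBashEnvVariables (path : String) : String :=
  pvAgo (path.toList.length + 1) path

-- ===== PORT B =====
-- fuel is a totality guard only: each loop round removes at least two characters from `rest`,
-- so `path.len + 1` rounds are never exhausted, on any input.
def pvBgo : Nat → List String → String → String
  | 0, out, rest => PySem.Str.join "" (out ++ [rest])
  | fuel + 1, out, rest =>
    let index := PySem.Str.find rest "$("
    let endIndex := PySem.Str.find rest ")"
    if index < 0 ∨ endIndex < index then PySem.Str.join "" (out ++ [rest])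
    else
      pvBgo fuel (out ++ [PySem.Str.slice rest none (some index)])
        ("$" ++ PySem.Str.slice rest (some (index + 2)) (some endIndex)
             ++ PySem.Str.slice rest (some (endIndex + 1)) none)

def ChangeToBashEnvVariables_alt (path : String) : String :=
  pvBgo (path.toList.length + 1) [] path

-- ===== PRECONDITION & SPEC =====
-- A single left-to-right scan deciding whether A's rewriting terminates: `d` counts '('s already
-- seen that are (or will become) attached to a '$', `chain` says the last character continues such
-- an attachment chain; a ')' with d = 0 stops all rewriting, and A then loops forever iff a "$("
-- still follows.
def pvScan : List Char → Bool → Nat → Bool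
  | [], _, _ => true
  | c :: t, chain, d =>
    if c = '$' then pvScan t true d
    else if c = '(' then (if chain then pvScan t true (d + 1) else pvScan t false d)
    else if c = ')' then (if d = 0 then !(PySem.Chars.isIn ['$', '('] t) else pvScan t chain (d - 1))
    else pvScan t false d

-- Pre_ excludes exactly the strings on which A's rewriting never terminates (Python raises
-- RecursionError): those where at some rewriting stage the first ')' precedes the first "$(".
def Pre_ChangeToBashEnvVariables (path : String) : Prop := pvScan path.toList false 0 = true
instance (path : String) : Decidable (Pre_ChangeToBashEnvVariables path) := by
  unfold Pre_ChangeToBashEnvVariables; infer_instance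

def pvWitness_ChangeToBashEnvVariables : String := "$(HOME)/lib/$(ARCH)"

def Spec_ChangeToBashEnvVariables (path : String) (out : String) : Prop :=
  out = ChangeToBashEnvVariables_alt path
instance (path : String) (out : String) : Decidable (Spec_ChangeToBashEnvVariables path out) := by
  unfold Spec_ChangeToBashEnvVariables; infer_instance

-- ===== CLAIM (what is proved, stated in full; the proofs are below) =====
def Claim_equal_ChangeToBashEnvVariables : Prop := ∀ (path : String), Dom_ChangeToBashEnvVariables path → Pre_ChangeToBashEnvVariables path → Spec_ChangeToBashEnvVariables path (ChangeToBashEnvVariables path)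

-- ===== LEMMAS AND PROOFS =====

-- state of the scan after a ')'-free segment
def pvMScan : List Char → Bool → Bool × Nat
  | [], chain => (chain, 0)
  | c :: t, chain =>
    if c = '$' then pvMScan t true
    else if c = '(' then
      (if chain then ((pvMScan t true).1, (pvMScan t true).2 + 1) else pvMScan t false)
    else pvMScan t false

lemma pvSingle (c : Char) (s : List Char) (j : Nat) :
    [c] <+: s.drop j ↔ s[j]? = some c := by
  have h : ∀ t : List Char, [c] <+: t ↔ t[0]? = some c := by
    intro t; cases t with
    | nil => simp
    | cons a t => simp [List.cons_prefix_cons, eq_comm]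
  rw [h, List.getElem?_drop, Nat.add_zero]

lemma pvPair (a b : Char) (s : List Char) (j : Nat) :
    [a, b] <+: s.drop j ↔ s[j]? = some a ∧ s[j + 1]? = some b := by
  have h : ∀ t : List Char, [a, b] <+: t ↔ t[0]? = some a ∧ t[1]? = some b := by
    intro t; cases t with
    | nil => simp
    | cons x t => cases t <;> simp [List.cons_prefix_cons, eq_comm]
  rw [h, List.getElem?_drop, List.getElem?_drop, Nat.add_zero]

lemma pvFindEq (s sub : List Char) (n : Nat)
    (h1 : sub <+: s.drop n) (h2 : ∀ j < n, ¬ sub <+: s.drop j) :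
    PySem.Chars.find s sub = n := by
  have hinf : sub <:+: s := h1.isInfix.trans (List.drop_suffix n s).isInfix
  have hge : 0 ≤ PySem.Chars.find s sub := (PySem.Chars.find_nonneg_iff s sub).mpr hinf
  obtain ⟨hp, hmin⟩ := PySem.Chars.find_spec hge
  have h1' : ¬ (PySem.Chars.find s sub).toNat < n := fun hlt => h2 _ hlt hp
  have h2' : ¬ n < (PySem.Chars.find s sub).toNat := fun hlt => hmin n hlt h1
  omega

lemma pvFindNeg (s sub : List Char) (h : ∀ j, ¬ sub <+: s.drop j) :
    PySem.Chars.find s sub = -1 := by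
  rw [PySem.Chars.find_eq_neg_one_iff]
  intro hinf
  have hiff := PySem.Chars.exists_prefix_drop_iff_isIn sub s
  rw [PySem.Chars.isIn_iff_infix] at hiff
  obtain ⟨j, hj⟩ := hiff.mpr hinf
  exact h j hj

lemma pvFindCases (s sub : List Char) :
    PySem.Chars.find s sub = -1 ∨ ∃ n : Nat, PySem.Chars.find s sub = n := by
  have := PySem.Chars.neg_one_le_find s sub
  rcases lt_or_ge (PySem.Chars.find s sub) 0 with h | h
  · left; omega
  · right; exact ⟨(PySem.Chars.find s sub).toNat, by omega⟩

lemma pvScanSeg (m : List Char) : ∀ (t : List Char) (chain : Bool) (d : Nat), ')' ∉ m →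
    pvScan (m ++ t) chain d = pvScan t (pvMScan m chain).1 (d + (pvMScan m chain).2) := by
  induction m with
  | nil => intro t chain d _; simp [pvMScan]
  | cons c m ih =>
    intro t chain d hm
    have hm' : ')' ∉ m := fun h => hm (List.mem_cons_of_mem _ h)
    have hc : c ≠ ')' := fun h => hm (h ▸ List.mem_cons_self)
    by_cases h1 : c = '$'
    · subst h1; simp only [List.cons_append, pvScan, pvMScan, reduceIte]
      exact ih t true d hm'
    · by_cases h2 : c = '('
      · subst h2
        cases chain with
        | true =>
          simp [List.cons_append, pvScan, pvMScan, h1]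
          rw [ih t true (d + 1) hm']
          congr 1
          omega
        | false =>
          simp [List.cons_append, pvScan, pvMScan, h1]
          exact ih t false d hm'
      · simp only [List.cons_append, pvScan, pvMScan, if_neg h1, if_neg h2, if_neg hc]
        exact ih t false d hm'

lemma pvMScanEats (b : List Char) : ∀ (chain : Bool),
    (∀ j, ¬ ['$', '('] <+: b.drop j) → (chain = true → b.head? ≠ some '(') →
    (pvMScan b chain).2 = 0 := by
  induction b with
  | nil => intro chain _ _; simp [pvMScan]
  | cons c t ih =>
    intro chain hadj hhd
    have hadj' : ∀ j, ¬ ['$', '('] <+: t.drop j := by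
      intro j h
      exact hadj (j + 1) (by simpa using h)
    by_cases h1 : c = '$'
    · subst h1
      simp only [pvMScan, reduceIte]
      apply ih true hadj'
      intro _ hh
      have : ['$', '('] <+: ('$' :: t).drop 0 := by
        rw [pvPair]
        cases t with
        | nil => simp at hh
        | cons x t => simp_all
      exact hadj 0 this
    · by_cases h2 : c = '('
      · subst h2
        cases chain with
        | true => simp at hhd
        | false =>
          simp only [pvMScan, if_neg h1, reduceIte]
          exact ih false hadj' (by simp)
      · simp only [pvMScan, if_neg h1, if_neg h2]
        exact ih false hadj' (by simp)

lemma pvScanBad (b w : List Char) (hb : ')' ∉ b)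
    (hadj : ∀ j, ¬ ['$', '('] <+: b.drop j)
    (hw : PySem.Chars.isIn ['$', '('] w = true) :
    pvScan (b ++ ')' :: w) false 0 = false := by
  rw [pvScanSeg b _ _ _ hb]
  rw [pvMScanEats b false hadj (by simp)]
  simp [pvScan, hw]

lemma pvScanStep (a m z : List Char) (ha : ')' ∉ a) (hm : ')' ∉ m) :
    pvScan (a ++ '$' :: '(' :: (m ++ ')' :: z)) false 0
      = pvScan (a ++ '$' :: (m ++ z)) false 0 := by
  have c1 : ¬(('(' : Char) = '$') := by decide
  have c2 : ¬((')' : Char) = '$') := by decide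
  have c3 : ¬((')' : Char) = '(') := by decide
  rw [pvScanSeg a _ _ _ ha, pvScanSeg a _ _ _ ha]
  simp only [pvScan, reduceIte]
  simp only [if_neg c1]
  rw [pvScanSeg m _ _ _ hm, pvScanSeg m _ _ _ hm]
  simp only [pvScan, if_neg c2, if_neg c3, reduceIte]
  rw [if_neg (by omega : ¬(0 + (pvMScan a false).2 + 1 + (pvMScan m true).2 = 0))]
  congr 1
  omega

lemma pvJoinApp (l1 l2 : List String) :
    PySem.Str.join "" (l1 ++ l2) = PySem.Str.join "" l1 ++ PySem.Str.join "" l2 := by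
  have hj : ∀ l : List (List Char), PySem.Chars.join [] l = l.flatten := by
    intro l
    show List.intercalate [] l = l.flatten
    unfold List.intercalate
    induction l with
    | nil => rfl
    | cons h t iht =>
      cases t with
      | nil => simp
      | cons h2 t2 => simpa using iht
  apply String.toList_inj.mp
  simp [PySem.Str.toList_join, hj]

lemma pvJoinSingle (r : String) : PySem.Str.join "" [r] = r := by
  apply String.toList_inj.mp
  simp [PySem.Str.toList_join]

lemma pvBgoFactor (fuel : Nat) : ∀ (out : List String) (rest : String),
    pvBgo fuel out rest = PySem.Str.join "" out ++ pvBgo fuel [] rest := by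
  induction fuel with
  | zero =>
    intro out rest
    simp only [pvBgo]
    rw [show out ++ [rest] = out ++ ([] ++ [rest]) by simp, pvJoinApp]
  | succ n ih =>
    intro out rest
    simp only [pvBgo]
    split
    · rw [show out ++ [rest] = out ++ ([] ++ [rest]) by simp, pvJoinApp]
    · rw [ih (out ++ [_]), ih ([] ++ [_]), pvJoinApp, pvJoinApp]
      have h0 : PySem.Str.join "" ([] : List String) = "" := rfl
      rw [h0]
      apply String.toList_inj.mp
      simp

lemma pvMemDropTake (R : List Char) (a n : Nat) (c : Char) (h : c ∈ (R.drop a).take n) :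
    ∃ j, a ≤ j ∧ j < a + n ∧ R[j]? = some c := by
  obtain ⟨j, hjlen, hjeq⟩ := List.mem_iff_getElem.mp h
  have hj' : j < n ∧ a + j < R.length := by simp [List.length_take, List.length_drop] at hjlen; omega
  refine ⟨a + j, by omega, by omega, ?_⟩
  rw [List.getElem_take, List.getElem_drop] at hjeq
  rw [List.getElem?_eq_getElem (by omega)]
  exact congrArg some hjeq

lemma pvMain : ∀ (fA fB : Nat) (pre rest : String),
    rest.toList.length + 1 ≤ fA → rest.toList.length + 1 ≤ fB →
    ')' ∉ pre.toList →
    (∀ j < pre.toList.length, ¬ ['$', '('] <+: (pre.toList ++ rest.toList).drop j) →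
    pvScan (pre.toList ++ rest.toList) false 0 = true →
    pvAgo fA (pre ++ rest) = pre ++ pvBgo fB [] rest := by
  intro fA
  induction fA with
  | zero => intro fB pre rest hA; omega
  | succ k ih =>
    intro fB pre rest hA hB H1 H2 hscan
    rcases fB with _ | m
    · omega
    set P := pre.toList with hP
    set R := rest.toList with hR
    have hgp : ("$(" : String).toList = ['$', '('] := by decide
    have hrp : (")" : String).toList = [')'] := by decide
    have hSfind : PySem.Str.find (pre ++ rest) "$(" = PySem.Chars.find (P ++ R) ['$', '('] := by
      rw [PySem.Str.find_eq, String.toList_append, hgp]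
    have hSfind2 : PySem.Str.find (pre ++ rest) ")" = PySem.Chars.find (P ++ R) [')'] := by
      rw [PySem.Str.find_eq, String.toList_append, hrp]
    have hRfind : PySem.Str.find rest "$(" = PySem.Chars.find R ['$', '('] := by
      rw [PySem.Str.find_eq, hgp]
    have hRfind2 : PySem.Str.find rest ")" = PySem.Chars.find R [')'] := by
      rw [PySem.Str.find_eq, hrp]
    rcases pvFindCases R ['$', '('] with hi | ⟨i, hi⟩
    · -- no "$(" in rest, hence none in pre ++ rest: both sides return unchanged
      have hminR : ∀ j, ¬ ['$', '('] <+: R.drop j := by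
        intro j h
        have : (['$', '('] : List Char) <:+: R := h.isInfix.trans (List.drop_suffix j R).isInfix
        exact absurd hi (by rw [PySem.Chars.find_eq_neg_one_iff]; simp [this])
      have hSi : PySem.Chars.find (P ++ R) ['$', '('] = -1 := by
        apply pvFindNeg
        intro j h
        by_cases hj : j < P.length
        · exact H2 j hj h
        · rw [show j = P.length + (j - P.length) by omega, List.drop_length_add_append] at h
          exact hminR _ h
      simp only [pvAgo, pvBgo, hSfind, hRfind, hSi, hi]
      norm_num
      rw [pvJoinSingle]
    · -- rest contains "$(" at first index i
      have h0i : (0 : Int) ≤ PySem.Chars.find R ['$', '('] := by rw [hi]; omega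
      obtain ⟨hpi, hmini⟩ := PySem.Chars.find_spec h0i
      rw [hi] at hpi hmini
      simp only [Int.toNat_natCast] at hpi hmini
      obtain ⟨hchar1, hchar2⟩ := (pvPair '$' '(' R i).mp hpi
      have hiL : i + 1 < R.length := (List.getElem?_eq_some_iff.mp hchar2).1
      have hminS : ∀ j < P.length + i, ¬ ['$', '('] <+: (P ++ R).drop j := by
        intro j hj h
        by_cases hjP : j < P.length
        · exact H2 j hjP h
        · rw [show j = P.length + (j - P.length) by omega, List.drop_length_add_append] at h
          exact hmini _ (by omega) h
      have hSi : PySem.Chars.find (P ++ R) ['$', '('] = ((P.length + i : Nat) : Int) := by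
        apply pvFindEq
        · rw [List.drop_length_add_append]; exact hpi
        · exact hminS
      rcases pvFindCases R [')'] with he | ⟨e, he⟩
      · -- no ')' in rest (nor in pre): A stops at endIndex < 0, B stops at endIndex < index
        have hminRe : ∀ j, ¬ [')'] <+: R.drop j := by
          intro j h
          have hinf : ([')'] : List Char) <:+: R := h.isInfix.trans (List.drop_suffix j R).isInfix
          exact absurd hinf (by rw [← PySem.Chars.find_eq_neg_one_iff] at *; exact he)
        have hSe : PySem.Chars.find (P ++ R) [')'] = -1 := by
          apply pvFindNeg
          intro j h
          by_cases hjP : j < P.length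
          · rw [pvSingle, List.getElem?_append_left hjP] at h
            exact H1 (List.mem_of_getElem? h)
          · rw [show j = P.length + (j - P.length) by omega, List.drop_length_add_append] at h
            exact hminRe _ h
        simp only [pvAgo, pvBgo, hSfind, hSfind2, hRfind, hRfind2, hSi, hSe, hi, he]
        rw [if_neg (by omega : ¬((((P.length + i : Nat) : Int)) < 0)),
            if_pos (by omega : (-1 : Int) < 0),
            if_pos (Or.inr (by omega : (-1 : Int) < ((i : Nat) : Int)))]
        simp only [List.nil_append]
        rw [pvJoinSingle]
      · -- first ')' of rest at e
        have h0e : (0 : Int) ≤ PySem.Chars.find R [')'] := by rw [he]; omega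
        obtain ⟨hpe, hmine⟩ := PySem.Chars.find_spec h0e
        rw [he] at hpe hmine
        simp only [Int.toNat_natCast] at hpe hmine
        have hRe : R[e]? = some ')' := (pvSingle ')' R e).mp hpe
        have heL : e < R.length := (List.getElem?_eq_some_iff.mp hRe).1
        have hmine' : ∀ j < e, R[j]? ≠ some ')' := by
          intro j hj h
          exact hmine j hj ((pvSingle ')' R j).mpr h)
        have hSe : PySem.Chars.find (P ++ R) [')'] = ((P.length + e : Nat) : Int) := by
          apply pvFindEq
          · rw [List.drop_length_add_append]; exact hpe
          · intro j hj h
            by_cases hjP : j < P.length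
            · rw [pvSingle, List.getElem?_append_left hjP] at h
              exact H1 (List.mem_of_getElem? h)
            · rw [show j = P.length + (j - P.length) by omega, List.drop_length_add_append] at h
              exact hmine _ (by omega) h
        have hnei : e ≠ i := by
          intro hEq; rw [hEq] at hRe; rw [hRe] at hchar1; simp at hchar1
        have hnei1 : e ≠ i + 1 := by
          intro hEq; rw [hEq] at hRe; rw [hRe] at hchar2; simp at hchar2
        by_cases hei : e < i
        · -- impossible under Pre_: the rewriting would never terminate
          exfalso
          have hdropS : (P ++ R).drop (P.length + e + 1) = R.drop (e + 1) := by
            rw [show P.length + e + 1 = P.length + (e + 1) by omega, List.drop_length_add_append]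
          have hRdec : R.drop e = ')' :: R.drop (e + 1) := by
            rw [List.drop_eq_getElem_cons heL]
            congr 1
            exact Option.some.inj (by rw [← List.getElem?_eq_getElem heL, hRe])
          have hSb : P ++ R = (P ++ R.take e) ++ ')' :: (P ++ R).drop (P.length + e + 1) := by
            conv_lhs => rw [← List.take_append_drop (P.length + e) (P ++ R)]
            rw [List.take_length_add_append, List.drop_length_add_append, hRdec, hdropS]
          have hbno : ')' ∉ P ++ R.take e := by
            intro hmem
            rcases List.mem_append.mp hmem with hm | hm
            · exact H1 hm
            · obtain ⟨j, _, hjlt, hjq⟩ := pvMemDropTake R 0 e ')' (by simpa using hm)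
              exact hmine' j (by omega) hjq
          have hbadj : ∀ j, ¬ ['$', '('] <+: (P ++ R.take e).drop j := by
            intro j h
            by_cases hj : j < P.length + e
            · have hbt : P ++ R.take e = (P ++ R).take (P.length + e) := by
                rw [List.take_length_add_append]
              rw [hbt, List.drop_take] at h
              exact hminS j (by omega) (h.trans (List.take_prefix _ _))
            · have hlen := h.length_le
              simp [List.length_take] at hlen
              omega
          have hwadj : PySem.Chars.isIn ['$', '('] ((P ++ R).drop (P.length + e + 1)) = true := by
            rw [← PySem.Chars.exists_prefix_drop_iff_isIn]
            refine ⟨P.length + i - (P.length + e + 1), ?_⟩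
            rw [List.drop_drop]
            rw [show P.length + e + 1 + (P.length + i - (P.length + e + 1)) = P.length + i by omega]
            rw [List.drop_length_add_append]
            exact hpi
          have hbad := pvScanBad _ _ hbno hbadj hwadj
          rw [← hSb] at hbad
          rw [hscan] at hbad
          exact Bool.true_eq_false.mp hbad
        · -- good step: first ")" comes after the first "$("
          have hgt : i + 2 ≤ e := by omega
          have hpieceL : (PySem.Str.slice rest none (some ((i : Nat) : Int))).toList = R.take i := by
            simp only [PySem.Str.toList_slice, PySem.Chars.slice_eq_listSlice]
            rw [PySem.List.slice_to_natCast]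
          set piece : String := PySem.Str.slice rest none (some ((i : Nat) : Int)) with hpiece
          set mid : List Char := (R.drop (i + 2)).take (e - (i + 2)) with hmid
          set z : List Char := R.drop (e + 1) with hz
          have hmidno : ')' ∉ mid := by
            intro hm
            obtain ⟨j, hj1, hj2, hjq⟩ := pvMemDropTake R (i + 2) (e - (i + 2)) ')' hm
            exact hmine' j (by omega) hjq
          have hRdec : R.drop e = ')' :: z := by
            rw [List.drop_eq_getElem_cons heL]
            congr 1
            exact Option.some.inj (by rw [← List.getElem?_eq_getElem heL, hRe])
          have hdropi : R.drop i = '$' :: '(' :: (mid ++ ')' :: z) := by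
            rw [List.drop_eq_getElem_cons (by omega : i < R.length)]
            congr 1
            · exact Option.some.inj (by rw [← List.getElem?_eq_getElem (by omega : i < R.length), hchar1])
            rw [List.drop_eq_getElem_cons (by omega : i + 1 < R.length)]
            congr 1
            · exact Option.some.inj (by rw [← List.getElem?_eq_getElem hiL, hchar2])
            rw [show i + 1 + 1 = i + 2 by omega]
            conv_lhs => rw [← List.take_append_drop (e - (i + 2)) (R.drop (i + 2))]
            rw [List.drop_drop, show i + 2 + (e - (i + 2)) = e by omega, hRdec]
          have hSdec : P ++ R = (P ++ R.take i) ++ '$' :: '(' :: (mid ++ ')' :: z) := by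
            conv_lhs => rw [← List.take_append_drop i R, hdropi]
            rw [List.append_assoc]
          set rest' : String := "$" ++ PySem.Str.slice rest (some (((i : Nat) : Int) + 2)) (some ((e : Nat) : Int))
                   ++ PySem.Str.slice rest (some (((e : Nat) : Int) + 1)) none with hrest'
          have cast1 : ((i : Int) + 2) = ((i + 2 : Nat) : Int) := by push_cast; ring
          have cast2 : ((e : Int) + 1) = ((e + 1 : Nat) : Int) := by push_cast; ring
          have hdollar : ("$" : String).toList = ['$'] := by decide
          have hrest'L : rest'.toList = '$' :: (mid ++ z) := by
            rw [hrest']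
            simp only [String.toList_append, PySem.Str.toList_slice, PySem.Chars.slice_eq_listSlice,
              cast1, cast2, PySem.List.slice_natCast, PySem.List.slice_from_natCast, hdollar]
            simp [hmid, hz, ← hR]
          have hpre'L : (pre ++ piece).toList = P ++ R.take i := by
            rw [String.toList_append, hpieceL]
          have hS' : (pre ++ piece).toList ++ rest'.toList = (P ++ R.take i) ++ '$' :: (mid ++ z) := by
            rw [hpre'L, hrest'L]
          have H1list : ')' ∉ P ++ R.take i := by
            intro hmem
            rcases List.mem_append.mp hmem with hm | hm
            · exact H1 hm
            · obtain ⟨j, _, hjlt, hjq⟩ := pvMemDropTake R 0 i ')' (by simpa using hm)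
              exact hmine' j (by omega) hjq
          have H1' : ')' ∉ (pre ++ piece).toList := by rw [hpre'L]; exact H1list
          have hplen : (pre ++ piece).toList.length = P.length + i := by
            rw [hpre'L]; simp [List.length_take]; omega
          have H2' : ∀ j < (pre ++ piece).toList.length,
              ¬ ['$', '('] <+: ((pre ++ piece).toList ++ rest'.toList).drop j := by
            intro j hj h
            rw [hS'] at h
            rw [pvPair] at h
            obtain ⟨ha1, ha2⟩ := h
            have hlen1 : (P ++ R.take i).length = P.length + i := by
              simp [List.length_take]; omega
            have hTj : ∀ j', j' < P.length + i →
                ((P ++ R.take i) ++ '$' :: (mid ++ z))[j']? = (P ++ R)[j']? := by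
              intro j' hj'
              rw [List.getElem?_append_left (by omega : j' < (P ++ R.take i).length)]
              by_cases hq : j' < P.length
              · rw [List.getElem?_append_left hq, List.getElem?_append_left hq]
              · rw [List.getElem?_append_right (by omega : P.length ≤ j'),
                    List.getElem?_append_right (by omega : P.length ≤ j'),
                    List.getElem?_take_of_lt (by omega)]
            have hTI : ((P ++ R.take i) ++ '$' :: (mid ++ z))[P.length + i]? = some '$' := by
              rw [List.getElem?_append_right (by omega : (P ++ R.take i).length ≤ P.length + i)]
              rw [hlen1]
              simp
            rw [hplen] at hj
            by_cases hcase : j + 1 < P.length + i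
            · exact hminS j (by omega)
                ((pvPair _ _ _ _).mpr ⟨by rw [← hTj j (by omega)]; exact ha1,
                                       by rw [← hTj (j + 1) hcase]; exact ha2⟩)
            · have hj1 : j + 1 = P.length + i := by omega
              rw [hj1, hTI] at ha2
              simp at ha2
          have hscan' : pvScan ((pre ++ piece).toList ++ rest'.toList) false 0 = true := by
            rw [hS']
            rw [hSdec] at hscan
            rw [pvScanStep _ _ _ H1list hmidno] at hscan
            exact hscan
          have hApath : PySem.Str.slice (pre ++ rest) none (some ((P.length + i : Nat) : Int)) ++ "$" ++
              PySem.Str.slice (pre ++ rest) (some (((P.length + i : Nat) : Int) + 2)) (some ((P.length + e : Nat) : Int)) ++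
              PySem.Str.slice (pre ++ rest) (some (((P.length + e : Nat) : Int) + 1)) none
              = (pre ++ piece) ++ rest' := by
            apply String.toList_inj.mp
            have cast3 : (((P.length + i : Nat) : Int) + 2) = ((P.length + (i + 2) : Nat) : Int) := by
              push_cast; ring
            have cast4 : (((P.length + e : Nat) : Int) + 1) = ((P.length + (e + 1) : Nat) : Int) := by
              push_cast; ring
            simp only [String.toList_append, PySem.Str.toList_slice, PySem.Chars.slice_eq_listSlice,
              cast3, cast4, PySem.List.slice_to_natCast, PySem.List.slice_natCast,
              PySem.List.slice_from_natCast, hdollar]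
            rw [List.take_length_add_append, List.drop_length_add_append, List.drop_length_add_append]
            rw [show P.length + e - (P.length + (i + 2)) = e - (i + 2) by omega]
            rw [hpieceL, hrest'L]
            simp [hmid, hz, ← hR, ← hP, List.append_assoc]
          have hstep : pvAgo (k + 1) (pre ++ rest) = pvAgo k ((pre ++ piece) ++ rest') := by
            simp only [pvAgo, hSfind, hSfind2, hSi, hSe]
            rw [if_neg (by omega : ¬(((P.length + i : Nat) : Int) < 0)),
                if_neg (by omega : ¬(((P.length + e : Nat) : Int) < 0))]
            rw [hApath]
          have hBstep : pvBgo (m + 1) [] rest = piece ++ pvBgo m [] rest' := by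
            simp only [pvBgo, hRfind, hRfind2, hi, he]
            rw [if_neg (by omega : ¬(((i : Nat) : Int) < 0 ∨ ((e : Nat) : Int) < ((i : Nat) : Int)))]
            simp only [List.nil_append]
            rw [pvBgoFactor, pvJoinSingle]
          have hmidlen : mid.length = e - (i + 2) := by
            simp [hmid, List.length_take, List.length_drop]
            omega
          have hzlen : z.length = R.length - (e + 1) := by simp [hz]
          have hrest'len : rest'.toList.length = 1 + mid.length + z.length := by
            rw [hrest'L]; simp; omega
          have hk' : rest'.toList.length + 1 ≤ k := by
            rw [hrest'len]; omega
          have hm' : rest'.toList.length + 1 ≤ m := by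
            rw [hrest'len]; omega
          rw [hstep, ih m (pre ++ piece) rest' hk' hm' H1' H2' hscan', hBstep]
          apply String.toList_inj.mp
          simp [List.append_assoc]

-- ===== VERDICT (by name: the statement is the Claim_ definition above) =====
theorem ChangeToBashEnvVariables_spec : Claim_equal_ChangeToBashEnvVariables := by
  intro path _ hpre
  show ChangeToBashEnvVariables path = ChangeToBashEnvVariables_alt path
  unfold ChangeToBashEnvVariables ChangeToBashEnvVariables_alt
  have hempty : ∀ s : String, "" ++ s = s := by
    intro s; apply String.toList_inj.mp; simp
  have h := pvMain (path.toList.length + 1) (path.toList.length + 1) "" path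
    (by simp) (by simp) (by simp) (by simp)
    (by simpa [Pre_ChangeToBashEnvVariables] using hpre)
  rw [hempty, hempty] at h
  exact h
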